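-- pv_equiv track=rewrite | github.com/jillianemargauxco/CSINTSY_MCO2 | main.py | build_prolog_query
-- ===== SOURCE A (Python) =====
-- def build_prolog_query(relation, args, find_all=False):
--
--     if relation == "siblings":
--         if find_all:
--             return f"sibling(X, {args[0].lower()})"
--         else:
--             return f"sibling({args[0].lower()}, {args[1].lower()})"
--
--     elif relation == "brother":
--         if find_all:
--             return f"brother(X, {args[0].lower()})"
--         else:
--             return f"brother({args[0].lower()}, {args[1].lower()})"
--
--     elif relation == "sister":
--         if find_all:
--             return f"sister(X, {args[0].lower()})"
--         else:
--             return f"sister({args[0].lower()}, {args[1].lower()})"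
--
--     elif relation == "father":
--         if find_all:
--             return f"father(X, {args[0].lower()})"
--         else:
--             return f"father({args[0].lower()}, {args[1].lower()})"
--
--     elif relation == "mother":
--         if find_all:
--             return f"mother(X, {args[0].lower()})"
--         else:
--             return f"mother({args[0].lower()}, {args[1].lower()})"
--
--     elif relation == "grandfather":
--         if find_all:
--             return f"grandfather(X, {args[0].lower()})"
--         else:
--             return f"grandfather({args[0].lower()}, {args[1].lower()})"
--
--     elif relation == "grandmother":
--         if find_all:
--             return f"grandmother(X, {args[0].lower()})"
--         else:
--             return f"grandmother({args[0].lower()}, {args[1].lower()})"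
--
--     elif relation == "parents":
--         if find_all:
--             return f"parent(X, {args[0].lower()})"
--         else:
--             parent1 = args[0].lower()
--             parent2 = args[1].lower()
--             child = args[2].lower()
--             return f"parent({parent1}, {child}), parent({parent2}, {child})"
--
--     elif relation == "children":
--         if find_all:
--             return f"parent({args[0].lower()}, X)"
--         else:
--             children_list = ', '.join(args[:-1])
--             parent = args[-1].lower()
--             return " , ".join([f"parent({parent}, {child.lower()})" for child in args[:-1]])
--
--
--     elif relation == "child":
--         if find_all:
--             return f"child(X, {args[0].lower()})"
--         else:
--             return f"child({args[0].lower()}, {args[1].lower()})"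
--
--     elif relation == "son":
--         if find_all:
--             return f"son(X, {args[0].lower()})"
--         else:
--             return f"son({args[0].lower()}, {args[1].lower()})"
--
--     elif relation == "daughter":
--         if find_all:
--             return f"daughter(X, {args[0].lower()})"
--         else:
--             return f"daughter({args[0].lower()}, {args[1].lower()})"
--
--     elif relation == "uncle":
--         if find_all:
--             return f"uncle(X, {args[0].lower()})"
--         else:
--             return f"uncle({args[0].lower()}, {args[1].lower()})"
--
--     elif relation == "aunt":
--         if find_all:
--             return f"aunt(X, {args[0].lower()})"
--         else:
--             return f"aunt({args[0].lower()}, {args[1].lower()})"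
--
--     elif relation == "relatives":
--         if find_all:
--             return f"relatives(X, {args[0].lower()})"
--         else:
--             return f"relatives({args[0].lower()}, {args[1].lower()})"
--
--     return ""
-- ===== SOURCE B (Python) =====
-- _REGULAR = ("siblings", "brother", "sister", "father", "mother", "grandfather",
--             "grandmother", "child", "son", "daughter", "uncle", "aunt", "relatives")
--
-- def build_prolog_query(relation, args, find_all=False):
--     # Build an intermediate goal list [(predicate, [terms...])] plus a separator,
--     # then render everything through one generic formatter.
--     sep = ", "
--     if relation in _REGULAR:
--         pred = "sibling" if relation == "siblings" else relation
--         if find_all: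
--             goals = [(pred, ["X", args[0].lower()])]
--         else:
--             goals = [(pred, [args[0].lower(), args[1].lower()])]
--     elif relation == "parents":
--         if find_all:
--             goals = [("parent", ["X", args[0].lower()])]
--         else:
--             c = args[2].lower()
--             goals = [("parent", [args[0].lower(), c]), ("parent", [args[1].lower(), c])]
--     elif relation == "children":
--         if find_all:
--             goals = [("parent", [args[0].lower(), "X"])]
--         else:
--             sep = " , "
--             p = args[-1].lower()
--             goals = [("parent", [p, c.lower()]) for c in args[:-1]]
--     else:
--         goals = []
--     return sep.join(f"{p}({', '.join(ts)})" for p, ts in goals)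
-- ===== Notes on version B (the rewrite author's own statement) =====
-- stated objective: alternative
-- what changed: B builds an intermediate representation - a separator plus a list of (predicate, term-list) goals - for every relation, and renders the whole query through one generic formatter, instead of A's fifteen branches each hand-writing its own f-string.
-- outside the precondition, e.g. on build_prolog_query('siblings', ['a'], False): A raises IndexError, B raises IndexError; on build_prolog_query('parents', ['a', 'b'], False): A raises IndexError, B raises IndexError; on build_prolog_query('children', [], False): A raises IndexError, B raises IndexError
import Mathlib
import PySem

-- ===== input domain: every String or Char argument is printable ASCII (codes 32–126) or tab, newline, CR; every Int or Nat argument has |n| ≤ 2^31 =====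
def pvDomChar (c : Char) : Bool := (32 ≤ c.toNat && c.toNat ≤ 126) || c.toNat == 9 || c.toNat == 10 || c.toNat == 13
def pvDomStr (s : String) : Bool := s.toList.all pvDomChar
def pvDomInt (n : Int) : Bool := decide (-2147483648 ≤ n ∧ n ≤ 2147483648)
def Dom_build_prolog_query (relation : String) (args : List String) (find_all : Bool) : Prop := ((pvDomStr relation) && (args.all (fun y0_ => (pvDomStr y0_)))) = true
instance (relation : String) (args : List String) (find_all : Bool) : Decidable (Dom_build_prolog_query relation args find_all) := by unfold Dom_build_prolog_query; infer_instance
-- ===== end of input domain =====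

-- B builds an intermediate goal list (predicate, term list) plus a separator and renders it
-- with one generic formatter, instead of A's fifteen hand-written f-string branches.

-- ===== PORT A =====
-- literal transliteration of Source A; args[i] is PySem.List.pyGetD (Pre_ guarantees the index
-- is in range, exactly where Python does not raise IndexError)
def build_prolog_query (relation : String) (args : List String) (find_all : Bool) : String :=
  if relation == "siblings" then
    if find_all then "sibling(X, " ++ PySem.Str.lower (PySem.List.pyGetD args 0 "") ++ ")"
    else "sibling(" ++ PySem.Str.lower (PySem.List.pyGetD args 0 "") ++ ", " ++ PySem.Str.lower (PySem.List.pyGetD args 1 "") ++ ")"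
  else if relation == "brother" then
    if find_all then "brother(X, " ++ PySem.Str.lower (PySem.List.pyGetD args 0 "") ++ ")"
    else "brother(" ++ PySem.Str.lower (PySem.List.pyGetD args 0 "") ++ ", " ++ PySem.Str.lower (PySem.List.pyGetD args 1 "") ++ ")"
  else if relation == "sister" then
    if find_all then "sister(X, " ++ PySem.Str.lower (PySem.List.pyGetD args 0 "") ++ ")"
    else "sister(" ++ PySem.Str.lower (PySem.List.pyGetD args 0 "") ++ ", " ++ PySem.Str.lower (PySem.List.pyGetD args 1 "") ++ ")"
  else if relation == "father" then
    if find_all then "father(X, " ++ PySem.Str.lower (PySem.List.pyGetD args 0 "") ++ ")"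
    else "father(" ++ PySem.Str.lower (PySem.List.pyGetD args 0 "") ++ ", " ++ PySem.Str.lower (PySem.List.pyGetD args 1 "") ++ ")"
  else if relation == "mother" then
    if find_all then "mother(X, " ++ PySem.Str.lower (PySem.List.pyGetD args 0 "") ++ ")"
    else "mother(" ++ PySem.Str.lower (PySem.List.pyGetD args 0 "") ++ ", " ++ PySem.Str.lower (PySem.List.pyGetD args 1 "") ++ ")"
  else if relation == "grandfather" then
    if find_all then "grandfather(X, " ++ PySem.Str.lower (PySem.List.pyGetD args 0 "") ++ ")"
    else "grandfather(" ++ PySem.Str.lower (PySem.List.pyGetD args 0 "") ++ ", " ++ PySem.Str.lower (PySem.List.pyGetD args 1 "") ++ ")"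
  else if relation == "grandmother" then
    if find_all then "grandmother(X, " ++ PySem.Str.lower (PySem.List.pyGetD args 0 "") ++ ")"
    else "grandmother(" ++ PySem.Str.lower (PySem.List.pyGetD args 0 "") ++ ", " ++ PySem.Str.lower (PySem.List.pyGetD args 1 "") ++ ")"
  else if relation == "parents" then
    if find_all then "parent(X, " ++ PySem.Str.lower (PySem.List.pyGetD args 0 "") ++ ")"
    else
      let parent1 := PySem.Str.lower (PySem.List.pyGetD args 0 "")
      let parent2 := PySem.Str.lower (PySem.List.pyGetD args 1 "")
      let child := PySem.Str.lower (PySem.List.pyGetD args 2 "")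
      "parent(" ++ parent1 ++ ", " ++ child ++ "), parent(" ++ parent2 ++ ", " ++ child ++ ")"
  else if relation == "children" then
    if find_all then "parent(" ++ PySem.Str.lower (PySem.List.pyGetD args 0 "") ++ ", X)"
    else
      -- Source A also computes an unused local 'children_list'; it has no effect on the result
      let parent := PySem.Str.lower (PySem.List.pyGetD args (-1) "")
      PySem.Str.join " , " ((PySem.List.slice args none (some (-1))).map
        (fun child => "parent(" ++ parent ++ ", " ++ PySem.Str.lower child ++ ")"))
  else if relation == "child" then
    if find_all then "child(X, " ++ PySem.Str.lower (PySem.List.pyGetD args 0 "") ++ ")"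
    else "child(" ++ PySem.Str.lower (PySem.List.pyGetD args 0 "") ++ ", " ++ PySem.Str.lower (PySem.List.pyGetD args 1 "") ++ ")"
  else if relation == "son" then
    if find_all then "son(X, " ++ PySem.Str.lower (PySem.List.pyGetD args 0 "") ++ ")"
    else "son(" ++ PySem.Str.lower (PySem.List.pyGetD args 0 "") ++ ", " ++ PySem.Str.lower (PySem.List.pyGetD args 1 "") ++ ")"
  else if relation == "daughter" then
    if find_all then "daughter(X, " ++ PySem.Str.lower (PySem.List.pyGetD args 0 "") ++ ")"
    else "daughter(" ++ PySem.Str.lower (PySem.List.pyGetD args 0 "") ++ ", " ++ PySem.Str.lower (PySem.List.pyGetD args 1 "") ++ ")"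
  else if relation == "uncle" then
    if find_all then "uncle(X, " ++ PySem.Str.lower (PySem.List.pyGetD args 0 "") ++ ")"
    else "uncle(" ++ PySem.Str.lower (PySem.List.pyGetD args 0 "") ++ ", " ++ PySem.Str.lower (PySem.List.pyGetD args 1 "") ++ ")"
  else if relation == "aunt" then
    if find_all then "aunt(X, " ++ PySem.Str.lower (PySem.List.pyGetD args 0 "") ++ ")"
    else "aunt(" ++ PySem.Str.lower (PySem.List.pyGetD args 0 "") ++ ", " ++ PySem.Str.lower (PySem.List.pyGetD args 1 "") ++ ")"
  else if relation == "relatives" then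
    if find_all then "relatives(X, " ++ PySem.Str.lower (PySem.List.pyGetD args 0 "") ++ ")"
    else "relatives(" ++ PySem.Str.lower (PySem.List.pyGetD args 0 "") ++ ", " ++ PySem.Str.lower (PySem.List.pyGetD args 1 "") ++ ")"
  else ""

-- ===== PORT B =====
def pvRegularRels : List String :=
  ["siblings", "brother", "sister", "father", "mother", "grandfather",
   "grandmother", "child", "son", "daughter", "uncle", "aunt", "relatives"]

def build_prolog_query_alt (relation : String) (args : List String) (find_all : Bool) : String :=
  let sg : String × List (String × List String) :=
    if pvRegularRels.contains relation then
      let pred := if relation == "siblings" then "sibling" else relation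
      if find_all then (", ", [(pred, ["X", PySem.Str.lower (PySem.List.pyGetD args 0 "")])])
      else (", ", [(pred, [PySem.Str.lower (PySem.List.pyGetD args 0 ""), PySem.Str.lower (PySem.List.pyGetD args 1 "")])])
    else if relation == "parents" then
      if find_all then (", ", [("parent", ["X", PySem.Str.lower (PySem.List.pyGetD args 0 "")])])
      else
        let c := PySem.Str.lower (PySem.List.pyGetD args 2 "")
        (", ", [("parent", [PySem.Str.lower (PySem.List.pyGetD args 0 ""), c]),
                ("parent", [PySem.Str.lower (PySem.List.pyGetD args 1 ""), c])])
    else if relation == "children" then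
      if find_all then (", ", [("parent", [PySem.Str.lower (PySem.List.pyGetD args 0 ""), "X"])])
      else
        let p := PySem.Str.lower (PySem.List.pyGetD args (-1) "")
        (" , ", (PySem.List.slice args none (some (-1))).map
          (fun c => ("parent", [p, PySem.Str.lower c])))
    else (", ", [])
  PySem.Str.join sg.1 (sg.2.map (fun g => g.1 ++ "(" ++ PySem.Str.join ", " g.2 ++ ")"))

-- ===== PRECONDITION & SPEC =====
-- Pre_ excludes exactly the inputs on which Python A raises IndexError: a recognised
-- relation with too few arguments for the chosen mode.
def Pre_build_prolog_query (relation : String) (args : List String) (find_all : Bool) : Prop :=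
  (relation ∈ ["siblings", "brother", "sister", "father", "mother", "grandfather",
               "grandmother", "child", "son", "daughter", "uncle", "aunt", "relatives"] →
     (if find_all then 1 ≤ args.length else 2 ≤ args.length)) ∧
  (relation = "parents" → (if find_all then 1 ≤ args.length else 3 ≤ args.length)) ∧
  (relation = "children" → 1 ≤ args.length)
instance (relation : String) (args : List String) (find_all : Bool) : Decidable (Pre_build_prolog_query relation args find_all) := by unfold Pre_build_prolog_query; infer_instance

def pvWitness_build_prolog_query : String × List String × Bool := ("siblings", ["Ana", "Bob"], false)

def Spec_build_prolog_query (relation : String) (args : List String) (find_all : Bool) (out : String) : Prop := out = build_prolog_query_alt relation args find_all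
instance (relation : String) (args : List String) (find_all : Bool) (out : String) : Decidable (Spec_build_prolog_query relation args find_all out) := by unfold Spec_build_prolog_query; infer_instance

-- ===== CLAIM =====
def Claim_equal_build_prolog_query : Prop := ∀ (relation : String) (args : List String) (find_all : Bool), Dom_build_prolog_query relation args find_all → Pre_build_prolog_query relation args find_all → Spec_build_prolog_query relation args find_all (build_prolog_query relation args find_all)

-- ===== LEMMAS AND PROOFS =====

theorem pv_join0 (s : String) : PySem.Str.join s [] = "" := by
  apply String.toList_injective
  simp [PySem.Str.join, PySem.Chars.join_nil]

theorem pv_goal2 (p c : String) :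
    ("parent(" : String) ++ PySem.Str.join ", " [p, c] ++ ")" = "parent(" ++ p ++ ", " ++ c ++ ")" := by
  apply String.toList_injective
  simp [PySem.Str.join, PySem.Chars.join_cons_cons, PySem.Chars.join_singleton]

set_option maxHeartbeats 2000000 in
-- ===== VERDICT =====
theorem build_prolog_query_spec : Claim_equal_build_prolog_query := by
  intro relation args find_all _ _
  unfold Spec_build_prolog_query
  by_cases h0 : relation = "siblings"
  · subst h0; cases find_all <;> (apply String.toList_injective; simp [build_prolog_query, build_prolog_query_alt, pvRegularRels, PySem.Str.join, PySem.Chars.join_cons_cons, PySem.Chars.join_singleton])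
  by_cases h1 : relation = "brother"
  · subst h1; cases find_all <;> (apply String.toList_injective; simp [build_prolog_query, build_prolog_query_alt, pvRegularRels, PySem.Str.join, PySem.Chars.join_cons_cons, PySem.Chars.join_singleton])
  by_cases h2 : relation = "sister"
  · subst h2; cases find_all <;> (apply String.toList_injective; simp [build_prolog_query, build_prolog_query_alt, pvRegularRels, PySem.Str.join, PySem.Chars.join_cons_cons, PySem.Chars.join_singleton])
  by_cases h3 : relation = "father"
  · subst h3; cases find_all <;> (apply String.toList_injective; simp [build_prolog_query, build_prolog_query_alt, pvRegularRels, PySem.Str.join, PySem.Chars.join_cons_cons, PySem.Chars.join_singleton])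
  by_cases h4 : relation = "mother"
  · subst h4; cases find_all <;> (apply String.toList_injective; simp [build_prolog_query, build_prolog_query_alt, pvRegularRels, PySem.Str.join, PySem.Chars.join_cons_cons, PySem.Chars.join_singleton])
  by_cases h5 : relation = "grandfather"
  · subst h5; cases find_all <;> (apply String.toList_injective; simp [build_prolog_query, build_prolog_query_alt, pvRegularRels, PySem.Str.join, PySem.Chars.join_cons_cons, PySem.Chars.join_singleton])
  by_cases h6 : relation = "grandmother"
  · subst h6; cases find_all <;> (apply String.toList_injective; simp [build_prolog_query, build_prolog_query_alt, pvRegularRels, PySem.Str.join, PySem.Chars.join_cons_cons, PySem.Chars.join_singleton])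
  by_cases h7 : relation = "parents"
  · subst h7; cases find_all <;> (apply String.toList_injective; simp [build_prolog_query, build_prolog_query_alt, pvRegularRels, PySem.Str.join, PySem.Chars.join_cons_cons, PySem.Chars.join_singleton])
  by_cases h8 : relation = "children"
  · subst h8; cases find_all
    · simp [build_prolog_query, build_prolog_query_alt, pvRegularRels, List.map_map,
            Function.comp_def, pv_goal2]
    · apply String.toList_injective; simp [build_prolog_query, build_prolog_query_alt, pvRegularRels, PySem.Str.join, PySem.Chars.join_cons_cons, PySem.Chars.join_singleton]
  by_cases h9 : relation = "child"
  · subst h9; cases find_all <;> (apply String.toList_injective; simp [build_prolog_query, build_prolog_query_alt, pvRegularRels, PySem.Str.join, PySem.Chars.join_cons_cons, PySem.Chars.join_singleton])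
  by_cases h10 : relation = "son"
  · subst h10; cases find_all <;> (apply String.toList_injective; simp [build_prolog_query, build_prolog_query_alt, pvRegularRels, PySem.Str.join, PySem.Chars.join_cons_cons, PySem.Chars.join_singleton])
  by_cases h11 : relation = "daughter"
  · subst h11; cases find_all <;> (apply String.toList_injective; simp [build_prolog_query, build_prolog_query_alt, pvRegularRels, PySem.Str.join, PySem.Chars.join_cons_cons, PySem.Chars.join_singleton])
  by_cases h12 : relation = "uncle"
  · subst h12; cases find_all <;> (apply String.toList_injective; simp [build_prolog_query, build_prolog_query_alt, pvRegularRels, PySem.Str.join, PySem.Chars.join_cons_cons, PySem.Chars.join_singleton])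
  by_cases h13 : relation = "aunt"
  · subst h13; cases find_all <;> (apply String.toList_injective; simp [build_prolog_query, build_prolog_query_alt, pvRegularRels, PySem.Str.join, PySem.Chars.join_cons_cons, PySem.Chars.join_singleton])
  by_cases h14 : relation = "relatives"
  · subst h14; cases find_all <;> (apply String.toList_injective; simp [build_prolog_query, build_prolog_query_alt, pvRegularRels, PySem.Str.join, PySem.Chars.join_cons_cons, PySem.Chars.join_singleton])
  simp [build_prolog_query, build_prolog_query_alt, pvRegularRels, h0, h1, h2, h3, h4, h5, h6, h7, h8, h9, h10, h11, h12, h13, h14, pv_join0]
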